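-- pv_equiv track=rewrite | github.com/ziwei-yang/pair-trading-screening | src/price_getter.py | get_stock_type
-- ===== SOURCE A (Python) =====
-- def get_stock_type(symbol: str):
--     def is_symbol_in_ranges(symbol, ranges: list):
--         symbol_int = int(symbol)
--         for _ in ranges:
--             floor, ceiling = _.split("-")
--             floor = int(floor)
--             ceiling = int(ceiling)
--             assert floor < ceiling
--             if floor <= symbol_int <= ceiling:
--                 return True
--         else:
--             return False
--
--     # if symbol in ['08202', '08272', '08265', '01573', '08108', '00153', '00449', '00238', '01363', '00729',
--     #                 '08001', '00633']:
--     #     return "Black list"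
--     if is_symbol_in_ranges(symbol, ["02800-02849", "03000-03199"]):
--         return "Exchange Traded Funds"
--     if is_symbol_in_ranges(symbol, ["04000-04199"]):
--         return "Hong Kong Monetary Authority Exchange Fund Notes"
--     if is_symbol_in_ranges(symbol, ["04200-04299"]):
--         return "HKSAR Government Bonds"
--     if is_symbol_in_ranges(symbol, ["04300-04329", "04400-04599", "05000-06029", "40000-40999"]):
--         return "Debt securities for professional investors only"
--     if is_symbol_in_ranges(symbol, ["04600-04699"]):
--         return "Professional Preference Shares"
--     if is_symbol_in_ranges(symbol, ["04700-04799"]):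
--         return "Debt securities for the public"
--     if is_symbol_in_ranges(symbol, ["06200-06299"]):
--         return "Hong Kong Depositary Receipts (HDRs)"
--     if is_symbol_in_ranges(symbol, ["06300-06399"]):
--         return "Securities/HDRs which are restricted securities (RS) under US federal securities laws."
--     if is_symbol_in_ranges(symbol, ["06750-06799"]):
--         return "Bonds of Ministry of the Finance of the People’s Republic of China"
--     if is_symbol_in_ranges(symbol, ["07200-07399", "07500-07599"]):
--         return "Leveraged and Inverse Products"
--     if is_symbol_in_ranges(symbol, ["08000-08999"]):
--         return "GEM securities"
--     if is_symbol_in_ranges(symbol, ["09000-09199", "09800-09849"]):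
--         return "Exchange Traded Funds (traded in USD)"
--     if is_symbol_in_ranges(symbol, ["09200-09399", "09500-09599"]):
--         return "Leveraged and Inverse Products (traded in USD)"
--
--     return "Normal stock"
-- ===== SOURCE B (Python) =====
-- _TABLE = [
--     (2800, 2849, "Exchange Traded Funds"),
--     (3000, 3199, "Exchange Traded Funds"),
--     (4000, 4199, "Hong Kong Monetary Authority Exchange Fund Notes"),
--     (4200, 4299, "HKSAR Government Bonds"),
--     (4300, 4329, "Debt securities for professional investors only"),
--     (4400, 4599, "Debt securities for professional investors only"),
--     (4600, 4699, "Professional Preference Shares"),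
--     (4700, 4799, "Debt securities for the public"),
--     (5000, 6029, "Debt securities for professional investors only"),
--     (6200, 6299, "Hong Kong Depositary Receipts (HDRs)"),
--     (6300, 6399, "Securities/HDRs which are restricted securities (RS) under US federal securities laws."),
--     (6750, 6799, "Bonds of Ministry of the Finance of the People\u2019s Republic of China"),
--     (7200, 7399, "Leveraged and Inverse Products"),
--     (7500, 7599, "Leveraged and Inverse Products"),
--     (8000, 8999, "GEM securities"),
--     (9000, 9199, "Exchange Traded Funds (traded in USD)"),
--     (9200, 9399, "Leveraged and Inverse Products (traded in USD)"),
--     (9500, 9599, "Leveraged and Inverse Products (traded in USD)"),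
--     (9800, 9849, "Exchange Traded Funds (traded in USD)"),
--     (40000, 40999, "Debt securities for professional investors only"),
-- ]
--
--
-- def get_stock_type(symbol: str):
--     n = int(symbol)
--     # binary search for the last interval whose lower bound is <= n
--     lo, hi = 0, len(_TABLE)
--     while lo < hi:
--         mid = (lo + hi) // 2
--         if _TABLE[mid][0] <= n:
--             lo = mid + 1
--         else:
--             hi = mid
--     if lo > 0 and n <= _TABLE[lo - 1][1]:
--         return _TABLE[lo - 1][2]
--     return "Normal stock"
-- ===== Notes on version B (the rewrite author's own statement) =====
-- stated objective: simpler
-- what changed: Replaced the 13 sequential category checks that each re-run int(symbol) and re-parse dash-separated range strings with a single flat integer interval table searched once by binary search on the interval lower bounds.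
import Mathlib
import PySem

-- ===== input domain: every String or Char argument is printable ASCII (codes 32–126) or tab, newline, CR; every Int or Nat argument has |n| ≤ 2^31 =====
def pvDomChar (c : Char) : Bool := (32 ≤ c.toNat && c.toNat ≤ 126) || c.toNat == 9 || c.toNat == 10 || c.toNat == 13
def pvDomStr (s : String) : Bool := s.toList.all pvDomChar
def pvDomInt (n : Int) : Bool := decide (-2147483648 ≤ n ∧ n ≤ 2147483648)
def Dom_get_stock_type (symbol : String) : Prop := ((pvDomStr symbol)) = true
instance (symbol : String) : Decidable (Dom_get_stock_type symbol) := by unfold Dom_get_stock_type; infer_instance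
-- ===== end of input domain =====

-- B replaces A's 13 string-parsing range scans by one binary search over a flat integer interval table (objective: simpler).

-- ===== PORT A =====
-- inner loop of is_symbol_in_ranges, with symbol_int already computed (A recomputes int(symbol)
-- identically on every call; the ValueError case is excluded by Pre_ below)
def pvInRanges (si : Int) : List String → Bool
  | [] => false
  | r :: rest =>
    match PySem.Str.split? r "-" with
    | some [f, c] =>
      let floor := (PySem.Int.ofStr? f).getD 0    -- never fails on A's literal range strings
      let ceiling := (PySem.Int.ofStr? c).getD 0
      if floor ≤ si ∧ si ≤ ceiling then true else pvInRanges si rest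
    | _ => false                                  -- unpacking error: unreachable on A's literal range strings

def get_stock_type (symbol : String) : String :=
  match PySem.Int.ofStr? symbol with
  | none => ""                                    -- int(symbol) raises ValueError; excluded by Pre_
  | some si =>
    if pvInRanges si ["02800-02849", "03000-03199"] then "Exchange Traded Funds"
    else if pvInRanges si ["04000-04199"] then "Hong Kong Monetary Authority Exchange Fund Notes"
    else if pvInRanges si ["04200-04299"] then "HKSAR Government Bonds"
    else if pvInRanges si ["04300-04329", "04400-04599", "05000-06029", "40000-40999"] then "Debt securities for professional investors only"
    else if pvInRanges si ["04600-04699"] then "Professional Preference Shares"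
    else if pvInRanges si ["04700-04799"] then "Debt securities for the public"
    else if pvInRanges si ["06200-06299"] then "Hong Kong Depositary Receipts (HDRs)"
    else if pvInRanges si ["06300-06399"] then "Securities/HDRs which are restricted securities (RS) under US federal securities laws."
    else if pvInRanges si ["06750-06799"] then "Bonds of Ministry of the Finance of the People’s Republic of China"
    else if pvInRanges si ["07200-07399", "07500-07599"] then "Leveraged and Inverse Products"
    else if pvInRanges si ["08000-08999"] then "GEM securities"
    else if pvInRanges si ["09000-09199", "09800-09849"] then "Exchange Traded Funds (traded in USD)"
    else if pvInRanges si ["09200-09399", "09500-09599"] then "Leveraged and Inverse Products (traded in USD)"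
    else "Normal stock"

-- ===== PORT B =====
def pvTable : List (Int × Int × String) :=
  [ (2800, 2849, "Exchange Traded Funds"),
    (3000, 3199, "Exchange Traded Funds"),
    (4000, 4199, "Hong Kong Monetary Authority Exchange Fund Notes"),
    (4200, 4299, "HKSAR Government Bonds"),
    (4300, 4329, "Debt securities for professional investors only"),
    (4400, 4599, "Debt securities for professional investors only"),
    (4600, 4699, "Professional Preference Shares"),
    (4700, 4799, "Debt securities for the public"),
    (5000, 6029, "Debt securities for professional investors only"),
    (6200, 6299, "Hong Kong Depositary Receipts (HDRs)"),
    (6300, 6399, "Securities/HDRs which are restricted securities (RS) under US federal securities laws."),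
    (6750, 6799, "Bonds of Ministry of the Finance of the People’s Republic of China"),
    (7200, 7399, "Leveraged and Inverse Products"),
    (7500, 7599, "Leveraged and Inverse Products"),
    (8000, 8999, "GEM securities"),
    (9000, 9199, "Exchange Traded Funds (traded in USD)"),
    (9200, 9399, "Leveraged and Inverse Products (traded in USD)"),
    (9500, 9599, "Leveraged and Inverse Products (traded in USD)"),
    (9800, 9849, "Exchange Traded Funds (traded in USD)"),
    (40000, 40999, "Debt securities for professional investors only") ]

-- Source B's while-loop as fuel recursion (fuel 32 strictly exceeds the iteration count: hi - lo ≤ 20 halves each step)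
def pvBSearch (n : Int) (lo hi : Nat) : Nat → Nat
  | 0 => lo
  | fuel + 1 =>
    if lo < hi then
      let mid := (lo + hi) / 2
      if (pvTable.getD mid (0, 0, "")).1 ≤ n then pvBSearch n (mid + 1) hi fuel
      else pvBSearch n lo mid fuel
    else lo

def get_stock_type_alt (symbol : String) : String :=
  match PySem.Int.ofStr? symbol with
  | none => ""                                    -- int(symbol) raises ValueError; excluded by Pre_
  | some n =>
    let lo := pvBSearch n 0 pvTable.length 32
    if 0 < lo ∧ n ≤ (pvTable.getD (lo - 1) (0, 0, "")).2.1 then (pvTable.getD (lo - 1) (0, 0, "")).2.2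
    else "Normal stock"

-- ===== PRECONDITION & SPEC =====
-- Pre_ excludes exactly the strings on which int(symbol) raises ValueError in both A and B.
def Pre_get_stock_type (symbol : String) : Prop := (PySem.Int.ofStr? symbol).isSome = true
instance (symbol : String) : Decidable (Pre_get_stock_type symbol) := by unfold Pre_get_stock_type; infer_instance
def pvWitness_get_stock_type : String := "02800"

def Spec_get_stock_type (symbol : String) (out : String) : Prop := out = get_stock_type_alt symbol
instance (symbol : String) (out : String) : Decidable (Spec_get_stock_type symbol out) := by unfold Spec_get_stock_type; infer_instance

-- ===== CLAIM (what is proved, stated in full; the proofs are below) =====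
def Claim_equal_get_stock_type : Prop := ∀ (symbol : String), Dom_get_stock_type symbol → Pre_get_stock_type symbol → Spec_get_stock_type symbol (get_stock_type symbol)

-- ===== LEMMAS AND PROOFS =====
theorem pv_bsearch_inv (n : Int) (fuel : Nat) : ∀ lo hi : Nat, lo ≤ hi → hi - lo ≤ fuel →
    lo ≤ pvBSearch n lo hi fuel ∧ pvBSearch n lo hi fuel ≤ hi ∧
    (lo < pvBSearch n lo hi fuel → (pvTable[pvBSearch n lo hi fuel - 1]?.getD (0,0,"")).1 ≤ n) ∧
    (pvBSearch n lo hi fuel < hi → n < (pvTable[pvBSearch n lo hi fuel]?.getD (0,0,"")).1) := by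
  induction fuel with
  | zero =>
    intro lo hi h1 h2
    have : lo = hi := by omega
    subst this; simp [pvBSearch]
  | succ m ih =>
    intro lo hi h1 h2
    by_cases hlt : lo < hi
    · by_cases hc : (pvTable[(lo + hi) / 2]?.getD (0,0,"")).1 ≤ n
      · have hrw : pvBSearch n lo hi (m+1) = pvBSearch n ((lo + hi) / 2 + 1) hi m := by
          simp [pvBSearch, hlt, hc]
        rw [hrw]
        obtain ⟨a,b,c,d⟩ := ih ((lo + hi) / 2 + 1) hi (by omega) (by omega)
        refine ⟨by omega, b, ?_, d⟩
        intro _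
        by_cases he : (lo + hi) / 2 + 1 < pvBSearch n ((lo + hi) / 2 + 1) hi m
        · exact c he
        · have hx : pvBSearch n ((lo + hi) / 2 + 1) hi m = (lo + hi) / 2 + 1 := by omega
          rw [hx]; simpa using hc
      · have hrw : pvBSearch n lo hi (m+1) = pvBSearch n lo ((lo + hi) / 2) m := by
          simp [pvBSearch, hlt, hc]
        rw [hrw]
        obtain ⟨a,b,c,d⟩ := ih lo ((lo + hi) / 2) (by omega) (by omega)
        refine ⟨a, by omega, c, ?_⟩
        intro _
        by_cases he : pvBSearch n lo ((lo + hi) / 2) m < (lo + hi) / 2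
        · exact d he
        · have hx : pvBSearch n lo ((lo + hi) / 2) m = (lo + hi) / 2 := by omega
          rw [hx]; omega
    · have : lo = hi := by omega
      subst this
      simp [pvBSearch]

theorem pv_step (si : Int) (r f c : String) (rest : List String) (a b : Int)
    (h1 : PySem.Str.split? r "-" = some [f, c])
    (h2 : (PySem.Int.ofStr? f).getD 0 = a) (h3 : (PySem.Int.ofStr? c).getD 0 = b) :
    pvInRanges si (r :: rest) = if a ≤ si ∧ si ≤ b then true else pvInRanges si rest := by
  simp only [pvInRanges, h1]; rw [h2, h3]

set_option maxHeartbeats 2000000 in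
theorem pv_core (n : Int) :
    (if pvInRanges n ["02800-02849", "03000-03199"] then "Exchange Traded Funds"
    else if pvInRanges n ["04000-04199"] then "Hong Kong Monetary Authority Exchange Fund Notes"
    else if pvInRanges n ["04200-04299"] then "HKSAR Government Bonds"
    else if pvInRanges n ["04300-04329", "04400-04599", "05000-06029", "40000-40999"] then "Debt securities for professional investors only"
    else if pvInRanges n ["04600-04699"] then "Professional Preference Shares"
    else if pvInRanges n ["04700-04799"] then "Debt securities for the public"
    else if pvInRanges n ["06200-06299"] then "Hong Kong Depositary Receipts (HDRs)"
    else if pvInRanges n ["06300-06399"] then "Securities/HDRs which are restricted securities (RS) under US federal securities laws."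
    else if pvInRanges n ["06750-06799"] then "Bonds of Ministry of the Finance of the People’s Republic of China"
    else if pvInRanges n ["07200-07399", "07500-07599"] then "Leveraged and Inverse Products"
    else if pvInRanges n ["08000-08999"] then "GEM securities"
    else if pvInRanges n ["09000-09199", "09800-09849"] then "Exchange Traded Funds (traded in USD)"
    else if pvInRanges n ["09200-09399", "09500-09599"] then "Leveraged and Inverse Products (traded in USD)"
    else "Normal stock") =
    (if 0 < pvBSearch n 0 pvTable.length 32 ∧ n ≤ (pvTable.getD (pvBSearch n 0 pvTable.length 32 - 1) (0, 0, "")).2.1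
     then (pvTable.getD (pvBSearch n 0 pvTable.length 32 - 1) (0, 0, "")).2.2
     else "Normal stock") := by
  rw [pv_step n "02800-02849" "02800" "02849" _ 2800 2849 (by decide) (by decide) (by decide),
      pv_step n "03000-03199" "03000" "03199" _ 3000 3199 (by decide) (by decide) (by decide),
      pv_step n "04000-04199" "04000" "04199" _ 4000 4199 (by decide) (by decide) (by decide),
      pv_step n "04200-04299" "04200" "04299" _ 4200 4299 (by decide) (by decide) (by decide),
      pv_step n "04300-04329" "04300" "04329" _ 4300 4329 (by decide) (by decide) (by decide),
      pv_step n "04400-04599" "04400" "04599" _ 4400 4599 (by decide) (by decide) (by decide),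
      pv_step n "05000-06029" "05000" "06029" _ 5000 6029 (by decide) (by decide) (by decide),
      pv_step n "40000-40999" "40000" "40999" _ 40000 40999 (by decide) (by decide) (by decide),
      pv_step n "04600-04699" "04600" "04699" _ 4600 4699 (by decide) (by decide) (by decide),
      pv_step n "04700-04799" "04700" "04799" _ 4700 4799 (by decide) (by decide) (by decide),
      pv_step n "06200-06299" "06200" "06299" _ 6200 6299 (by decide) (by decide) (by decide),
      pv_step n "06300-06399" "06300" "06399" _ 6300 6399 (by decide) (by decide) (by decide),
      pv_step n "06750-06799" "06750" "06799" _ 6750 6799 (by decide) (by decide) (by decide),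
      pv_step n "07200-07399" "07200" "07399" _ 7200 7399 (by decide) (by decide) (by decide),
      pv_step n "07500-07599" "07500" "07599" _ 7500 7599 (by decide) (by decide) (by decide),
      pv_step n "08000-08999" "08000" "08999" _ 8000 8999 (by decide) (by decide) (by decide),
      pv_step n "09000-09199" "09000" "09199" _ 9000 9199 (by decide) (by decide) (by decide),
      pv_step n "09800-09849" "09800" "09849" _ 9800 9849 (by decide) (by decide) (by decide),
      pv_step n "09200-09399" "09200" "09399" _ 9200 9399 (by decide) (by decide) (by decide),
      pv_step n "09500-09599" "09500" "09599" _ 9500 9599 (by decide) (by decide) (by decide)]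
  have hlen : pvTable.length = 20 := rfl
  obtain ⟨hk0, hk20, hlow, hhigh⟩ := pv_bsearch_inv n 32 0 pvTable.length (by omega) (by norm_num [hlen])
  generalize hgen : pvBSearch n 0 pvTable.length 32 = k at hk20 hlow hhigh ⊢
  rw [hlen] at hk20 hhigh
  simp only [pvInRanges, Bool.if_true_left, Bool.if_false_right, Bool.or_eq_true, Bool.and_eq_true, decide_eq_true_eq, Bool.decide_and, and_true]
  interval_cases k
  · rw [show ((pvTable.getD (0-1) ((0:Int),(0:Int),"")).2.1) = (2849:Int) from rfl]
    have hb := hhigh (by norm_num)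
    rw [show (pvTable[(0:Nat)]?.getD ((0:Int), (0:Int), "")).1 = (2800:Int) from rfl] at hb
    rw [if_neg (by omega)]
    rw [if_neg (by omega)]
    rw [if_neg (by omega)]
    rw [if_neg (by omega)]
    rw [if_neg (by omega)]
    rw [if_neg (by omega)]
    rw [if_neg (by omega)]
    rw [if_neg (by omega)]
    rw [if_neg (by omega)]
    rw [if_neg (by omega)]
    rw [if_neg (by omega)]
    rw [if_neg (by omega)]
    rw [if_neg (by omega)]
    rw [if_neg (by omega)]
  · have ha := hlow (by norm_num)
    rw [show (pvTable[1 - 1]?.getD ((0:Int), (0:Int), "")).1 = (2800:Int) from rfl] at ha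
    have hb := hhigh (by norm_num)
    rw [show (pvTable[(1:Nat)]?.getD ((0:Int), (0:Int), "")).1 = (3000:Int) from rfl] at hb
    rw [show ((pvTable.getD (1-1) ((0:Int),(0:Int),"")).2.1) = (2849:Int) from rfl,
        show ((pvTable.getD (1-1) ((0:Int),(0:Int),"")).2.2) = "Exchange Traded Funds" from rfl]
    by_cases hc : n ≤ (2849:Int)
    · rw [if_pos (by omega)]
      rw [if_pos (by omega)]
    · rw [if_neg (by omega)]
      rw [if_neg (by omega)]
      rw [if_neg (by omega)]
      rw [if_neg (by omega)]
      rw [if_neg (by omega)]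
      rw [if_neg (by omega)]
      rw [if_neg (by omega)]
      rw [if_neg (by omega)]
      rw [if_neg (by omega)]
      rw [if_neg (by omega)]
      rw [if_neg (by omega)]
      rw [if_neg (by omega)]
      rw [if_neg (by omega)]
      rw [if_neg (by omega)]
  · have ha := hlow (by norm_num)
    rw [show (pvTable[2 - 1]?.getD ((0:Int), (0:Int), "")).1 = (3000:Int) from rfl] at ha
    have hb := hhigh (by norm_num)
    rw [show (pvTable[(2:Nat)]?.getD ((0:Int), (0:Int), "")).1 = (4000:Int) from rfl] at hb
    rw [show ((pvTable.getD (2-1) ((0:Int),(0:Int),"")).2.1) = (3199:Int) from rfl,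
        show ((pvTable.getD (2-1) ((0:Int),(0:Int),"")).2.2) = "Exchange Traded Funds" from rfl]
    by_cases hc : n ≤ (3199:Int)
    · rw [if_pos (by omega)]
      rw [if_pos (by omega)]
    · rw [if_neg (by omega)]
      rw [if_neg (by omega)]
      rw [if_neg (by omega)]
      rw [if_neg (by omega)]
      rw [if_neg (by omega)]
      rw [if_neg (by omega)]
      rw [if_neg (by omega)]
      rw [if_neg (by omega)]
      rw [if_neg (by omega)]
      rw [if_neg (by omega)]
      rw [if_neg (by omega)]
      rw [if_neg (by omega)]
      rw [if_neg (by omega)]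
      rw [if_neg (by omega)]
  · have ha := hlow (by norm_num)
    rw [show (pvTable[3 - 1]?.getD ((0:Int), (0:Int), "")).1 = (4000:Int) from rfl] at ha
    have hb := hhigh (by norm_num)
    rw [show (pvTable[(3:Nat)]?.getD ((0:Int), (0:Int), "")).1 = (4200:Int) from rfl] at hb
    rw [show ((pvTable.getD (3-1) ((0:Int),(0:Int),"")).2.1) = (4199:Int) from rfl,
        show ((pvTable.getD (3-1) ((0:Int),(0:Int),"")).2.2) = "Hong Kong Monetary Authority Exchange Fund Notes" from rfl]
    by_cases hc : n ≤ (4199:Int)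
    · rw [if_neg (by omega)]
      rw [if_pos (by omega)]
      rw [if_pos (by omega)]
    · rw [if_neg (by omega)]
      rw [if_neg (by omega)]
      rw [if_neg (by omega)]
      rw [if_neg (by omega)]
      rw [if_neg (by omega)]
      rw [if_neg (by omega)]
      rw [if_neg (by omega)]
      rw [if_neg (by omega)]
      rw [if_neg (by omega)]
      rw [if_neg (by omega)]
      rw [if_neg (by omega)]
      rw [if_neg (by omega)]
      rw [if_neg (by omega)]
      rw [if_neg (by omega)]
  · have ha := hlow (by norm_num)
    rw [show (pvTable[4 - 1]?.getD ((0:Int), (0:Int), "")).1 = (4200:Int) from rfl] at ha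
    have hb := hhigh (by norm_num)
    rw [show (pvTable[(4:Nat)]?.getD ((0:Int), (0:Int), "")).1 = (4300:Int) from rfl] at hb
    rw [show ((pvTable.getD (4-1) ((0:Int),(0:Int),"")).2.1) = (4299:Int) from rfl,
        show ((pvTable.getD (4-1) ((0:Int),(0:Int),"")).2.2) = "HKSAR Government Bonds" from rfl]
    by_cases hc : n ≤ (4299:Int)
    · rw [if_neg (by omega)]
      rw [if_neg (by omega)]
      rw [if_pos (by omega)]
      rw [if_pos (by omega)]
    · rw [if_neg (by omega)]
      rw [if_neg (by omega)]
      rw [if_neg (by omega)]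
      rw [if_neg (by omega)]
      rw [if_neg (by omega)]
      rw [if_neg (by omega)]
      rw [if_neg (by omega)]
      rw [if_neg (by omega)]
      rw [if_neg (by omega)]
      rw [if_neg (by omega)]
      rw [if_neg (by omega)]
      rw [if_neg (by omega)]
      rw [if_neg (by omega)]
      rw [if_neg (by omega)]
  · have ha := hlow (by norm_num)
    rw [show (pvTable[5 - 1]?.getD ((0:Int), (0:Int), "")).1 = (4300:Int) from rfl] at ha
    have hb := hhigh (by norm_num)
    rw [show (pvTable[(5:Nat)]?.getD ((0:Int), (0:Int), "")).1 = (4400:Int) from rfl] at hb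
    rw [show ((pvTable.getD (5-1) ((0:Int),(0:Int),"")).2.1) = (4329:Int) from rfl,
        show ((pvTable.getD (5-1) ((0:Int),(0:Int),"")).2.2) = "Debt securities for professional investors only" from rfl]
    by_cases hc : n ≤ (4329:Int)
    · rw [if_neg (by omega)]
      rw [if_neg (by omega)]
      rw [if_neg (by omega)]
      rw [if_pos (by omega)]
      rw [if_pos (by omega)]
    · rw [if_neg (by omega)]
      rw [if_neg (by omega)]
      rw [if_neg (by omega)]
      rw [if_neg (by omega)]
      rw [if_neg (by omega)]
      rw [if_neg (by omega)]
      rw [if_neg (by omega)]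
      rw [if_neg (by omega)]
      rw [if_neg (by omega)]
      rw [if_neg (by omega)]
      rw [if_neg (by omega)]
      rw [if_neg (by omega)]
      rw [if_neg (by omega)]
      rw [if_neg (by omega)]
  · have ha := hlow (by norm_num)
    rw [show (pvTable[6 - 1]?.getD ((0:Int), (0:Int), "")).1 = (4400:Int) from rfl] at ha
    have hb := hhigh (by norm_num)
    rw [show (pvTable[(6:Nat)]?.getD ((0:Int), (0:Int), "")).1 = (4600:Int) from rfl] at hb
    rw [show ((pvTable.getD (6-1) ((0:Int),(0:Int),"")).2.1) = (4599:Int) from rfl,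
        show ((pvTable.getD (6-1) ((0:Int),(0:Int),"")).2.2) = "Debt securities for professional investors only" from rfl]
    by_cases hc : n ≤ (4599:Int)
    · rw [if_neg (by omega)]
      rw [if_neg (by omega)]
      rw [if_neg (by omega)]
      rw [if_pos (by omega)]
      rw [if_pos (by omega)]
    · rw [if_neg (by omega)]
      rw [if_neg (by omega)]
      rw [if_neg (by omega)]
      rw [if_neg (by omega)]
      rw [if_neg (by omega)]
      rw [if_neg (by omega)]
      rw [if_neg (by omega)]
      rw [if_neg (by omega)]
      rw [if_neg (by omega)]
      rw [if_neg (by omega)]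
      rw [if_neg (by omega)]
      rw [if_neg (by omega)]
      rw [if_neg (by omega)]
      rw [if_neg (by omega)]
  · have ha := hlow (by norm_num)
    rw [show (pvTable[7 - 1]?.getD ((0:Int), (0:Int), "")).1 = (4600:Int) from rfl] at ha
    have hb := hhigh (by norm_num)
    rw [show (pvTable[(7:Nat)]?.getD ((0:Int), (0:Int), "")).1 = (4700:Int) from rfl] at hb
    rw [show ((pvTable.getD (7-1) ((0:Int),(0:Int),"")).2.1) = (4699:Int) from rfl,
        show ((pvTable.getD (7-1) ((0:Int),(0:Int),"")).2.2) = "Professional Preference Shares" from rfl]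
    by_cases hc : n ≤ (4699:Int)
    · rw [if_neg (by omega)]
      rw [if_neg (by omega)]
      rw [if_neg (by omega)]
      rw [if_neg (by omega)]
      rw [if_pos (by omega)]
      rw [if_pos (by omega)]
    · rw [if_neg (by omega)]
      rw [if_neg (by omega)]
      rw [if_neg (by omega)]
      rw [if_neg (by omega)]
      rw [if_neg (by omega)]
      rw [if_neg (by omega)]
      rw [if_neg (by omega)]
      rw [if_neg (by omega)]
      rw [if_neg (by omega)]
      rw [if_neg (by omega)]
      rw [if_neg (by omega)]
      rw [if_neg (by omega)]
      rw [if_neg (by omega)]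
      rw [if_neg (by omega)]
  · have ha := hlow (by norm_num)
    rw [show (pvTable[8 - 1]?.getD ((0:Int), (0:Int), "")).1 = (4700:Int) from rfl] at ha
    have hb := hhigh (by norm_num)
    rw [show (pvTable[(8:Nat)]?.getD ((0:Int), (0:Int), "")).1 = (5000:Int) from rfl] at hb
    rw [show ((pvTable.getD (8-1) ((0:Int),(0:Int),"")).2.1) = (4799:Int) from rfl,
        show ((pvTable.getD (8-1) ((0:Int),(0:Int),"")).2.2) = "Debt securities for the public" from rfl]
    by_cases hc : n ≤ (4799:Int)
    · rw [if_neg (by omega)]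
      rw [if_neg (by omega)]
      rw [if_neg (by omega)]
      rw [if_neg (by omega)]
      rw [if_neg (by omega)]
      rw [if_pos (by omega)]
      rw [if_pos (by omega)]
    · rw [if_neg (by omega)]
      rw [if_neg (by omega)]
      rw [if_neg (by omega)]
      rw [if_neg (by omega)]
      rw [if_neg (by omega)]
      rw [if_neg (by omega)]
      rw [if_neg (by omega)]
      rw [if_neg (by omega)]
      rw [if_neg (by omega)]
      rw [if_neg (by omega)]
      rw [if_neg (by omega)]
      rw [if_neg (by omega)]
      rw [if_neg (by omega)]
      rw [if_neg (by omega)]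
  · have ha := hlow (by norm_num)
    rw [show (pvTable[9 - 1]?.getD ((0:Int), (0:Int), "")).1 = (5000:Int) from rfl] at ha
    have hb := hhigh (by norm_num)
    rw [show (pvTable[(9:Nat)]?.getD ((0:Int), (0:Int), "")).1 = (6200:Int) from rfl] at hb
    rw [show ((pvTable.getD (9-1) ((0:Int),(0:Int),"")).2.1) = (6029:Int) from rfl,
        show ((pvTable.getD (9-1) ((0:Int),(0:Int),"")).2.2) = "Debt securities for professional investors only" from rfl]
    by_cases hc : n ≤ (6029:Int)
    · rw [if_neg (by omega)]
      rw [if_neg (by omega)]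
      rw [if_neg (by omega)]
      rw [if_pos (by omega)]
      rw [if_pos (by omega)]
    · rw [if_neg (by omega)]
      rw [if_neg (by omega)]
      rw [if_neg (by omega)]
      rw [if_neg (by omega)]
      rw [if_neg (by omega)]
      rw [if_neg (by omega)]
      rw [if_neg (by omega)]
      rw [if_neg (by omega)]
      rw [if_neg (by omega)]
      rw [if_neg (by omega)]
      rw [if_neg (by omega)]
      rw [if_neg (by omega)]
      rw [if_neg (by omega)]
      rw [if_neg (by omega)]
  · have ha := hlow (by norm_num)
    rw [show (pvTable[10 - 1]?.getD ((0:Int), (0:Int), "")).1 = (6200:Int) from rfl] at ha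
    have hb := hhigh (by norm_num)
    rw [show (pvTable[(10:Nat)]?.getD ((0:Int), (0:Int), "")).1 = (6300:Int) from rfl] at hb
    rw [show ((pvTable.getD (10-1) ((0:Int),(0:Int),"")).2.1) = (6299:Int) from rfl,
        show ((pvTable.getD (10-1) ((0:Int),(0:Int),"")).2.2) = "Hong Kong Depositary Receipts (HDRs)" from rfl]
    by_cases hc : n ≤ (6299:Int)
    · rw [if_neg (by omega)]
      rw [if_neg (by omega)]
      rw [if_neg (by omega)]
      rw [if_neg (by omega)]
      rw [if_neg (by omega)]
      rw [if_neg (by omega)]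
      rw [if_pos (by omega)]
      rw [if_pos (by omega)]
    · rw [if_neg (by omega)]
      rw [if_neg (by omega)]
      rw [if_neg (by omega)]
      rw [if_neg (by omega)]
      rw [if_neg (by omega)]
      rw [if_neg (by omega)]
      rw [if_neg (by omega)]
      rw [if_neg (by omega)]
      rw [if_neg (by omega)]
      rw [if_neg (by omega)]
      rw [if_neg (by omega)]
      rw [if_neg (by omega)]
      rw [if_neg (by omega)]
      rw [if_neg (by omega)]
  · have ha := hlow (by norm_num)
    rw [show (pvTable[11 - 1]?.getD ((0:Int), (0:Int), "")).1 = (6300:Int) from rfl] at ha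
    have hb := hhigh (by norm_num)
    rw [show (pvTable[(11:Nat)]?.getD ((0:Int), (0:Int), "")).1 = (6750:Int) from rfl] at hb
    rw [show ((pvTable.getD (11-1) ((0:Int),(0:Int),"")).2.1) = (6399:Int) from rfl,
        show ((pvTable.getD (11-1) ((0:Int),(0:Int),"")).2.2) = "Securities/HDRs which are restricted securities (RS) under US federal securities laws." from rfl]
    by_cases hc : n ≤ (6399:Int)
    · rw [if_neg (by omega)]
      rw [if_neg (by omega)]
      rw [if_neg (by omega)]
      rw [if_neg (by omega)]
      rw [if_neg (by omega)]
      rw [if_neg (by omega)]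
      rw [if_neg (by omega)]
      rw [if_pos (by omega)]
      rw [if_pos (by omega)]
    · rw [if_neg (by omega)]
      rw [if_neg (by omega)]
      rw [if_neg (by omega)]
      rw [if_neg (by omega)]
      rw [if_neg (by omega)]
      rw [if_neg (by omega)]
      rw [if_neg (by omega)]
      rw [if_neg (by omega)]
      rw [if_neg (by omega)]
      rw [if_neg (by omega)]
      rw [if_neg (by omega)]
      rw [if_neg (by omega)]
      rw [if_neg (by omega)]
      rw [if_neg (by omega)]
  · have ha := hlow (by norm_num)
    rw [show (pvTable[12 - 1]?.getD ((0:Int), (0:Int), "")).1 = (6750:Int) from rfl] at ha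
    have hb := hhigh (by norm_num)
    rw [show (pvTable[(12:Nat)]?.getD ((0:Int), (0:Int), "")).1 = (7200:Int) from rfl] at hb
    rw [show ((pvTable.getD (12-1) ((0:Int),(0:Int),"")).2.1) = (6799:Int) from rfl,
        show ((pvTable.getD (12-1) ((0:Int),(0:Int),"")).2.2) = "Bonds of Ministry of the Finance of the People’s Republic of China" from rfl]
    by_cases hc : n ≤ (6799:Int)
    · rw [if_neg (by omega)]
      rw [if_neg (by omega)]
      rw [if_neg (by omega)]
      rw [if_neg (by omega)]
      rw [if_neg (by omega)]
      rw [if_neg (by omega)]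
      rw [if_neg (by omega)]
      rw [if_neg (by omega)]
      rw [if_pos (by omega)]
      rw [if_pos (by omega)]
    · rw [if_neg (by omega)]
      rw [if_neg (by omega)]
      rw [if_neg (by omega)]
      rw [if_neg (by omega)]
      rw [if_neg (by omega)]
      rw [if_neg (by omega)]
      rw [if_neg (by omega)]
      rw [if_neg (by omega)]
      rw [if_neg (by omega)]
      rw [if_neg (by omega)]
      rw [if_neg (by omega)]
      rw [if_neg (by omega)]
      rw [if_neg (by omega)]
      rw [if_neg (by omega)]
  · have ha := hlow (by norm_num)
    rw [show (pvTable[13 - 1]?.getD ((0:Int), (0:Int), "")).1 = (7200:Int) from rfl] at ha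
    have hb := hhigh (by norm_num)
    rw [show (pvTable[(13:Nat)]?.getD ((0:Int), (0:Int), "")).1 = (7500:Int) from rfl] at hb
    rw [show ((pvTable.getD (13-1) ((0:Int),(0:Int),"")).2.1) = (7399:Int) from rfl,
        show ((pvTable.getD (13-1) ((0:Int),(0:Int),"")).2.2) = "Leveraged and Inverse Products" from rfl]
    by_cases hc : n ≤ (7399:Int)
    · rw [if_neg (by omega)]
      rw [if_neg (by omega)]
      rw [if_neg (by omega)]
      rw [if_neg (by omega)]
      rw [if_neg (by omega)]
      rw [if_neg (by omega)]
      rw [if_neg (by omega)]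
      rw [if_neg (by omega)]
      rw [if_neg (by omega)]
      rw [if_pos (by omega)]
      rw [if_pos (by omega)]
    · rw [if_neg (by omega)]
      rw [if_neg (by omega)]
      rw [if_neg (by omega)]
      rw [if_neg (by omega)]
      rw [if_neg (by omega)]
      rw [if_neg (by omega)]
      rw [if_neg (by omega)]
      rw [if_neg (by omega)]
      rw [if_neg (by omega)]
      rw [if_neg (by omega)]
      rw [if_neg (by omega)]
      rw [if_neg (by omega)]
      rw [if_neg (by omega)]
      rw [if_neg (by omega)]
  · have ha := hlow (by norm_num)
    rw [show (pvTable[14 - 1]?.getD ((0:Int), (0:Int), "")).1 = (7500:Int) from rfl] at ha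
    have hb := hhigh (by norm_num)
    rw [show (pvTable[(14:Nat)]?.getD ((0:Int), (0:Int), "")).1 = (8000:Int) from rfl] at hb
    rw [show ((pvTable.getD (14-1) ((0:Int),(0:Int),"")).2.1) = (7599:Int) from rfl,
        show ((pvTable.getD (14-1) ((0:Int),(0:Int),"")).2.2) = "Leveraged and Inverse Products" from rfl]
    by_cases hc : n ≤ (7599:Int)
    · rw [if_neg (by omega)]
      rw [if_neg (by omega)]
      rw [if_neg (by omega)]
      rw [if_neg (by omega)]
      rw [if_neg (by omega)]
      rw [if_neg (by omega)]
      rw [if_neg (by omega)]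
      rw [if_neg (by omega)]
      rw [if_neg (by omega)]
      rw [if_pos (by omega)]
      rw [if_pos (by omega)]
    · rw [if_neg (by omega)]
      rw [if_neg (by omega)]
      rw [if_neg (by omega)]
      rw [if_neg (by omega)]
      rw [if_neg (by omega)]
      rw [if_neg (by omega)]
      rw [if_neg (by omega)]
      rw [if_neg (by omega)]
      rw [if_neg (by omega)]
      rw [if_neg (by omega)]
      rw [if_neg (by omega)]
      rw [if_neg (by omega)]
      rw [if_neg (by omega)]
      rw [if_neg (by omega)]
  · have ha := hlow (by norm_num)
    rw [show (pvTable[15 - 1]?.getD ((0:Int), (0:Int), "")).1 = (8000:Int) from rfl] at ha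
    have hb := hhigh (by norm_num)
    rw [show (pvTable[(15:Nat)]?.getD ((0:Int), (0:Int), "")).1 = (9000:Int) from rfl] at hb
    rw [show ((pvTable.getD (15-1) ((0:Int),(0:Int),"")).2.1) = (8999:Int) from rfl,
        show ((pvTable.getD (15-1) ((0:Int),(0:Int),"")).2.2) = "GEM securities" from rfl]
    by_cases hc : n ≤ (8999:Int)
    · rw [if_neg (by omega)]
      rw [if_neg (by omega)]
      rw [if_neg (by omega)]
      rw [if_neg (by omega)]
      rw [if_neg (by omega)]
      rw [if_neg (by omega)]
      rw [if_neg (by omega)]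
      rw [if_neg (by omega)]
      rw [if_neg (by omega)]
      rw [if_neg (by omega)]
      rw [if_pos (by omega)]
      rw [if_pos (by omega)]
    · rw [if_neg (by omega)]
      rw [if_neg (by omega)]
      rw [if_neg (by omega)]
      rw [if_neg (by omega)]
      rw [if_neg (by omega)]
      rw [if_neg (by omega)]
      rw [if_neg (by omega)]
      rw [if_neg (by omega)]
      rw [if_neg (by omega)]
      rw [if_neg (by omega)]
      rw [if_neg (by omega)]
      rw [if_neg (by omega)]
      rw [if_neg (by omega)]
      rw [if_neg (by omega)]
  · have ha := hlow (by norm_num)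
    rw [show (pvTable[16 - 1]?.getD ((0:Int), (0:Int), "")).1 = (9000:Int) from rfl] at ha
    have hb := hhigh (by norm_num)
    rw [show (pvTable[(16:Nat)]?.getD ((0:Int), (0:Int), "")).1 = (9200:Int) from rfl] at hb
    rw [show ((pvTable.getD (16-1) ((0:Int),(0:Int),"")).2.1) = (9199:Int) from rfl,
        show ((pvTable.getD (16-1) ((0:Int),(0:Int),"")).2.2) = "Exchange Traded Funds (traded in USD)" from rfl]
    by_cases hc : n ≤ (9199:Int)
    · rw [if_neg (by omega)]
      rw [if_neg (by omega)]
      rw [if_neg (by omega)]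
      rw [if_neg (by omega)]
      rw [if_neg (by omega)]
      rw [if_neg (by omega)]
      rw [if_neg (by omega)]
      rw [if_neg (by omega)]
      rw [if_neg (by omega)]
      rw [if_neg (by omega)]
      rw [if_neg (by omega)]
      rw [if_pos (by omega)]
      rw [if_pos (by omega)]
    · rw [if_neg (by omega)]
      rw [if_neg (by omega)]
      rw [if_neg (by omega)]
      rw [if_neg (by omega)]
      rw [if_neg (by omega)]
      rw [if_neg (by omega)]
      rw [if_neg (by omega)]
      rw [if_neg (by omega)]
      rw [if_neg (by omega)]
      rw [if_neg (by omega)]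
      rw [if_neg (by omega)]
      rw [if_neg (by omega)]
      rw [if_neg (by omega)]
      rw [if_neg (by omega)]
  · have ha := hlow (by norm_num)
    rw [show (pvTable[17 - 1]?.getD ((0:Int), (0:Int), "")).1 = (9200:Int) from rfl] at ha
    have hb := hhigh (by norm_num)
    rw [show (pvTable[(17:Nat)]?.getD ((0:Int), (0:Int), "")).1 = (9500:Int) from rfl] at hb
    rw [show ((pvTable.getD (17-1) ((0:Int),(0:Int),"")).2.1) = (9399:Int) from rfl,
        show ((pvTable.getD (17-1) ((0:Int),(0:Int),"")).2.2) = "Leveraged and Inverse Products (traded in USD)" from rfl]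
    by_cases hc : n ≤ (9399:Int)
    · rw [if_neg (by omega)]
      rw [if_neg (by omega)]
      rw [if_neg (by omega)]
      rw [if_neg (by omega)]
      rw [if_neg (by omega)]
      rw [if_neg (by omega)]
      rw [if_neg (by omega)]
      rw [if_neg (by omega)]
      rw [if_neg (by omega)]
      rw [if_neg (by omega)]
      rw [if_neg (by omega)]
      rw [if_neg (by omega)]
      rw [if_pos (by omega)]
      rw [if_pos (by omega)]
    · rw [if_neg (by omega)]
      rw [if_neg (by omega)]
      rw [if_neg (by omega)]
      rw [if_neg (by omega)]
      rw [if_neg (by omega)]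
      rw [if_neg (by omega)]
      rw [if_neg (by omega)]
      rw [if_neg (by omega)]
      rw [if_neg (by omega)]
      rw [if_neg (by omega)]
      rw [if_neg (by omega)]
      rw [if_neg (by omega)]
      rw [if_neg (by omega)]
      rw [if_neg (by omega)]
  · have ha := hlow (by norm_num)
    rw [show (pvTable[18 - 1]?.getD ((0:Int), (0:Int), "")).1 = (9500:Int) from rfl] at ha
    have hb := hhigh (by norm_num)
    rw [show (pvTable[(18:Nat)]?.getD ((0:Int), (0:Int), "")).1 = (9800:Int) from rfl] at hb
    rw [show ((pvTable.getD (18-1) ((0:Int),(0:Int),"")).2.1) = (9599:Int) from rfl,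
        show ((pvTable.getD (18-1) ((0:Int),(0:Int),"")).2.2) = "Leveraged and Inverse Products (traded in USD)" from rfl]
    by_cases hc : n ≤ (9599:Int)
    · rw [if_neg (by omega)]
      rw [if_neg (by omega)]
      rw [if_neg (by omega)]
      rw [if_neg (by omega)]
      rw [if_neg (by omega)]
      rw [if_neg (by omega)]
      rw [if_neg (by omega)]
      rw [if_neg (by omega)]
      rw [if_neg (by omega)]
      rw [if_neg (by omega)]
      rw [if_neg (by omega)]
      rw [if_neg (by omega)]
      rw [if_pos (by omega)]
      rw [if_pos (by omega)]
    · rw [if_neg (by omega)]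
      rw [if_neg (by omega)]
      rw [if_neg (by omega)]
      rw [if_neg (by omega)]
      rw [if_neg (by omega)]
      rw [if_neg (by omega)]
      rw [if_neg (by omega)]
      rw [if_neg (by omega)]
      rw [if_neg (by omega)]
      rw [if_neg (by omega)]
      rw [if_neg (by omega)]
      rw [if_neg (by omega)]
      rw [if_neg (by omega)]
      rw [if_neg (by omega)]
  · have ha := hlow (by norm_num)
    rw [show (pvTable[19 - 1]?.getD ((0:Int), (0:Int), "")).1 = (9800:Int) from rfl] at ha
    have hb := hhigh (by norm_num)
    rw [show (pvTable[(19:Nat)]?.getD ((0:Int), (0:Int), "")).1 = (40000:Int) from rfl] at hb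
    rw [show ((pvTable.getD (19-1) ((0:Int),(0:Int),"")).2.1) = (9849:Int) from rfl,
        show ((pvTable.getD (19-1) ((0:Int),(0:Int),"")).2.2) = "Exchange Traded Funds (traded in USD)" from rfl]
    by_cases hc : n ≤ (9849:Int)
    · rw [if_neg (by omega)]
      rw [if_neg (by omega)]
      rw [if_neg (by omega)]
      rw [if_neg (by omega)]
      rw [if_neg (by omega)]
      rw [if_neg (by omega)]
      rw [if_neg (by omega)]
      rw [if_neg (by omega)]
      rw [if_neg (by omega)]
      rw [if_neg (by omega)]
      rw [if_neg (by omega)]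
      rw [if_pos (by omega)]
      rw [if_pos (by omega)]
    · rw [if_neg (by omega)]
      rw [if_neg (by omega)]
      rw [if_neg (by omega)]
      rw [if_neg (by omega)]
      rw [if_neg (by omega)]
      rw [if_neg (by omega)]
      rw [if_neg (by omega)]
      rw [if_neg (by omega)]
      rw [if_neg (by omega)]
      rw [if_neg (by omega)]
      rw [if_neg (by omega)]
      rw [if_neg (by omega)]
      rw [if_neg (by omega)]
      rw [if_neg (by omega)]
  · have ha := hlow (by norm_num)
    rw [show (pvTable[20 - 1]?.getD ((0:Int), (0:Int), "")).1 = (40000:Int) from rfl] at ha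
    rw [show ((pvTable.getD (20-1) ((0:Int),(0:Int),"")).2.1) = (40999:Int) from rfl,
        show ((pvTable.getD (20-1) ((0:Int),(0:Int),"")).2.2) = "Debt securities for professional investors only" from rfl]
    by_cases hc : n ≤ (40999:Int)
    · rw [if_neg (by omega)]
      rw [if_neg (by omega)]
      rw [if_neg (by omega)]
      rw [if_pos (by omega)]
      rw [if_pos (by omega)]
    · rw [if_neg (by omega)]
      rw [if_neg (by omega)]
      rw [if_neg (by omega)]
      rw [if_neg (by omega)]
      rw [if_neg (by omega)]
      rw [if_neg (by omega)]
      rw [if_neg (by omega)]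
      rw [if_neg (by omega)]
      rw [if_neg (by omega)]
      rw [if_neg (by omega)]
      rw [if_neg (by omega)]
      rw [if_neg (by omega)]
      rw [if_neg (by omega)]
      rw [if_neg (by omega)]

-- ===== VERDICT (by name: the statement is the Claim_ definition above) =====
theorem get_stock_type_spec : Claim_equal_get_stock_type := by
  intro symbol _ hpre
  unfold Spec_get_stock_type get_stock_type get_stock_type_alt
  cases h : PySem.Int.ofStr? symbol with
  | none => simp [Pre_get_stock_type, h] at hpre
  | some n => exact pv_core n
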